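-- pv_equiv track=rewrite | github.com/coco1578/DKU-IDA-Lab | TorNetwork/ShuaiLi/Preprocess/ngram.py | NgramLocator
-- ===== SOURCE A (Python) =====
-- def NgramLocator(sample, Ng):
--
--     index = 0
--     for i in range(Ng):
--         if sample[i] == 1:
--             bit = 1
--         else:
--             bit = 0
--         index = index + bit * (2**(Ng-i-1))
--
--     return index
-- ===== SOURCE B (Python) =====
-- def NgramLocator(sample, Ng):
--     if Ng <= 0:
--         return 0
--     bits = ''.join('1' if sample[i] == 1 else '0' for i in range(Ng))
--     return int(bits, 2)
-- ===== Notes on version B (the rewrite author's own statement) =====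
-- stated objective: idiomatic
-- what changed: B builds the length-Ng binary string ('1' iff sample[i]==1) and parses it once with int(bits, 2), replacing A's per-bit power-of-two accumulation.
import Mathlib
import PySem

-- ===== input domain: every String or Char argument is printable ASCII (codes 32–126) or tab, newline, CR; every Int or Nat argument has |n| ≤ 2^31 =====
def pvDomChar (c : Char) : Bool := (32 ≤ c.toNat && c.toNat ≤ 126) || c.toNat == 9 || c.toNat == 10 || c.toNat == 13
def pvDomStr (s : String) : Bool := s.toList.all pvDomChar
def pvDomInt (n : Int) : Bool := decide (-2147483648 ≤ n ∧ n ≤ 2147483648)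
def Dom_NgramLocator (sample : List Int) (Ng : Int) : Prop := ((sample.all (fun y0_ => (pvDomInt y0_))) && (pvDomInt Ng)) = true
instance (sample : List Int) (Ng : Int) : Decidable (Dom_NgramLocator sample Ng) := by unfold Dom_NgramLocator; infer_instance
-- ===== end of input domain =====

-- B builds the binary string of sample's first Ng bits and parses it in one step,
-- instead of A's per-bit power-of-two accumulation. (objective: idiomatic)


-- ===== PORT A =====
-- sample[i]: Python raises IndexError when i ≥ len(sample); Pre_ excludes exactly that,
-- so the .getD 0 default is never hit inside Pre_.
def NgramLocator (sample : List Int) (Ng : Int) : Int :=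
  (PySem.List.pyRange 0 Ng 1).foldl
    (fun index i =>
      let bit : Int := if (PySem.List.pyGet? sample i).getD 0 = 1 then 1 else 0
      index + bit * 2 ^ (Ng - i - 1).toNat)
    0

-- ===== PORT B =====
-- int(bits, 2) on a string of '0'/'1' characters, ported by hand (exact on that domain):
def pvParseBin (s : String) : Int :=
  s.toList.foldl (fun a c => 2 * a + (if c = '1' then 1 else 0)) 0

def NgramLocator_alt (sample : List Int) (Ng : Int) : Int :=
  if Ng ≤ 0 then 0
  else
    let bits : String := String.ofList
      ((PySem.List.pyRange 0 Ng 1).map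
        (fun i => if (PySem.List.pyGet? sample i).getD 0 = 1 then '1' else '0'))
    pvParseBin bits

-- ===== PRECONDITION & SPEC =====
-- Python A raises IndexError iff Ng > len(sample) (loop index reaches len(sample)); B raises there too.
def Pre_NgramLocator (sample : List Int) (Ng : Int) : Prop := Ng ≤ (sample.length : Int)
instance (sample : List Int) (Ng : Int) : Decidable (Pre_NgramLocator sample Ng) := by
  unfold Pre_NgramLocator; infer_instance
def pvWitness_NgramLocator : List Int × Int := ([1, 0, 1, 1], 4)

def Spec_NgramLocator (sample : List Int) (Ng : Int) (out : Int) : Prop := out = NgramLocator_alt sample Ng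
instance (sample : List Int) (Ng : Int) (out : Int) : Decidable (Spec_NgramLocator sample Ng out) := by unfold Spec_NgramLocator; infer_instance

-- ===== CLAIM (what is proved, stated in full; the proofs are below) =====
def Claim_equal_NgramLocator : Prop := ∀ (sample : List Int) (Ng : Int), Dom_NgramLocator sample Ng → Pre_NgramLocator sample Ng → Spec_NgramLocator sample Ng (NgramLocator sample Ng)

-- ===== LEMMAS AND PROOFS =====

-- A's accumulation over range n, as a closed Finset sum.
theorem pv_foldl_add_sum (b w : Nat → Int) (n : Nat) (c : Int) :
    (List.range n).foldl (fun a i => a + b i * w i) c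
      = c + ∑ i ∈ Finset.range n, b i * w i := by
  induction n generalizing c with
  | zero => simp
  | succ m ih =>
      rw [List.range_succ, List.foldl_append, Finset.sum_range_succ, ih]
      simp [add_assoc]

-- Horner's rule over range n equals the big-endian weighted sum with weights 2^(n-1-i).
theorem pv_horner_eq_sum (b : Nat → Int) (n : Nat) :
    (List.range n).foldl (fun a i => 2 * a + b i) 0
      = ∑ i ∈ Finset.range n, b i * 2 ^ (n - 1 - i) := by
  induction n with
  | zero => simp
  | succ m ih =>
      rw [List.range_succ, List.foldl_append, Finset.sum_range_succ, ih]
      simp only [List.foldl_cons, List.foldl_nil, Nat.succ_sub_one, Nat.sub_self, pow_zero,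
        mul_one, Finset.mul_sum]
      congr 1
      refine Finset.sum_congr rfl (fun i hi => ?_)
      have hi' : i < m := Finset.mem_range.mp hi
      have h2 : m - i = (m - 1 - i) + 1 := by omega
      rw [h2, pow_succ]
      ring

theorem NgramLocator_spec : Claim_equal_NgramLocator := by
  unfold Claim_equal_NgramLocator
  intro sample Ng _ _
  unfold Spec_NgramLocator NgramLocator NgramLocator_alt pvParseBin
  by_cases h : Ng ≤ 0
  · have h0 : (Ng - 0).toNat = 0 := by omega
    rw [PySem.List.pyRange_one, h0, if_pos h]
    rfl
  · simp only [h, if_false]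
    rw [PySem.List.pyRange_one]
    simp only [String.toList_ofList, List.map_map, List.foldl_map, Function.comp, zero_add]
    set n : Nat := (Ng - 0).toNat with hn
    have hNg : Ng = (n : Int) := by omega
    show (List.range n).foldl
        (fun (a : Int) (k : Nat) =>
          a + (if (PySem.List.pyGet? sample (k : Int)).getD 0 = 1 then (1:Int) else 0)
              * 2 ^ (Ng - (k : Int) - 1).toNat) 0
      = (List.range n).foldl
        (fun (a : Int) (k : Nat) =>
          2 * a + (if (if (PySem.List.pyGet? sample (k : Int)).getD 0 = 1 then '1' else '0') = '1'
                   then (1:Int) else 0)) 0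
    rw [pv_foldl_add_sum
          (fun k : Nat => if (PySem.List.pyGet? sample (k : Int)).getD 0 = 1 then (1:Int) else 0)
          (fun k : Nat => 2 ^ (Ng - (k : Int) - 1).toNat) n 0,
        pv_horner_eq_sum
          (fun k : Nat => if (if (PySem.List.pyGet? sample (k : Int)).getD 0 = 1 then '1' else '0') = '1'
                          then (1:Int) else 0) n,
        zero_add]
    refine Finset.sum_congr rfl (fun i hi => ?_)
    have hi' : i < n := Finset.mem_range.mp hi
    have hex : (Ng - (i : Int) - 1).toNat = n - 1 - i := by omega
    rw [hex]
    split_ifs with hc h1 h2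
    · rfl
    · exact absurd rfl h1
    · exact absurd h2 (by decide)
    · rfl
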